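-- pv_equiv track=rewrite | github.com/ADG-Projects/IngestLab | web/routes/reviews.py | _summarize_reviews
-- ===== SOURCE A (Python) =====
-- from typing import Any, Dict, List, Optional
--
-- def _summarize_reviews(items: List[Dict[str, Any]]) -> Dict[str, Dict[str, int]]:
--     summary = {
--         "overall": {"good": 0, "bad": 0, "total": 0},
--         "chunks": {"good": 0, "bad": 0, "total": 0},
--         "elements": {"good": 0, "bad": 0, "total": 0},
--     }
--     for item in items:
--         if not item:
--             continue
--         rating = (item.get("rating") or "").lower()
--         kind = (item.get("kind") or "").lower()
--         if rating not in {"good", "bad"}: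
--             continue
--         summary["overall"][rating] += 1
--         summary["overall"]["total"] += 1
--         target = summary["chunks" if kind == "chunk" else "elements"]
--         target[rating] += 1
--         target["total"] += 1
--     return summary
-- ===== SOURCE B (Python) =====
-- from collections import Counter
--
-- def _summarize_reviews(items):
--     valid = [((item.get("rating") or "").lower(), (item.get("kind") or "").lower())
--              for item in items if item]
--     chunk_ratings = [r for r, k in valid if k == "chunk" and r in ("good", "bad")]
--     elem_ratings = [r for r, k in valid if k != "chunk" and r in ("good", "bad")]
--     c = Counter(chunk_ratings)
--     e = Counter(elem_ratings)
--     chunks = {"good": c["good"], "bad": c["bad"], "total": c["good"] + c["bad"]}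
--     elements = {"good": e["good"], "bad": e["bad"], "total": e["good"] + e["bad"]}
--     overall = {key: chunks[key] + elements[key] for key in ("good", "bad", "total")}
--     return {"overall": overall, "chunks": chunks, "elements": elements}
-- ===== Notes on version B (the rewrite author's own statement) =====
-- stated objective: alternative
-- what changed: Replaces the single interleaved loop that increments a nested dict of counters with a partition-then-tabulate structure: one comprehension normalises and filters valid ratings, two comprehensions split them into chunk/element buckets, Counter tabulates each, and the summary (including overall = elementwise sum) is assembled at the end.
import Mathlib
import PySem

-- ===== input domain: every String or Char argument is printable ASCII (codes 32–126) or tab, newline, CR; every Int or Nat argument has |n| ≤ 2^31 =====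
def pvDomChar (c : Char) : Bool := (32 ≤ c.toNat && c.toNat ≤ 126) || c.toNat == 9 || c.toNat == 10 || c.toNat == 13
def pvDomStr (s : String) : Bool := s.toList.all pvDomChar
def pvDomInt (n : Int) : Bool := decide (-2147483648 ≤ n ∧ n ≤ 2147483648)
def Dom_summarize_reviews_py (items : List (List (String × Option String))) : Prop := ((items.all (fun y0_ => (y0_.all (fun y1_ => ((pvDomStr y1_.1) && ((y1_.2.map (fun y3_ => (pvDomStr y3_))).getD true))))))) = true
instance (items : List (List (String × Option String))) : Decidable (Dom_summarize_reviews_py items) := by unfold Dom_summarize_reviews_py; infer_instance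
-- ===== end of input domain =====

-- B is an alternative decomposition of the same O(n) task: partition-then-tabulate instead of
-- one interleaved loop of nested-dict increments.

-- ===== PORT A =====
-- (item.get(k) or "").lower() : missing key or None or "" all collapse to ""
def pvGetStr (item : List (String × Option String)) (k : String) : String :=
  PySem.Str.lower ((((PySem.Dict.mk item).get? k).bind id).getD "")

-- literal transliteration of A's loop: summary is a dict of dicts, updated in place per item
def summarize_reviews_py (items : List (List (String × Option String))) : List (String × List (String × Int)) :=
  let summary : PySem.Dict String (PySem.Dict String Int) :=
    PySem.Dict.mk [("overall", PySem.Dict.mk [("good", 0), ("bad", 0), ("total", 0)]),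
                   ("chunks",  PySem.Dict.mk [("good", 0), ("bad", 0), ("total", 0)]),
                   ("elements", PySem.Dict.mk [("good", 0), ("bad", 0), ("total", 0)])]
  let final := items.foldl (fun s item =>
    if item = [] then s
    else
      let rating := pvGetStr item "rating"
      let kind := pvGetStr item "kind"
      if ¬ (rating = "good" ∨ rating = "bad") then s
      else
        -- summary["overall"][rating] += 1 ; summary["overall"]["total"] += 1
        let s := s.modify "overall" PySem.Dict.empty
          (fun d => (d.modify rating 0 (· + 1)).modify "total" 0 (· + 1))
        -- target = summary["chunks" if kind == "chunk" else "elements"]; target[rating] += 1; target["total"] += 1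
        s.modify (if kind = "chunk" then "chunks" else "elements") PySem.Dict.empty
          (fun d => (d.modify rating 0 (· + 1)).modify "total" 0 (· + 1))) summary
  final.items.map (fun p => (p.1, p.2.items))

-- ===== PORT B =====
-- transliteration of Source B: normalise+filter, partition into two rating lists, Counter each, assemble
def summarize_reviews_py_alt (items : List (List (String × Option String))) : List (String × List (String × Int)) :=
  let valid := (items.filter (fun item => !(item = []))).map
    (fun item => (pvGetStr item "rating", pvGetStr item "kind"))
  let chunk_ratings := (valid.filter (fun p => p.2 == "chunk" && (p.1 == "good" || p.1 == "bad"))).map (·.1)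
  let elem_ratings := (valid.filter (fun p => p.2 != "chunk" && (p.1 == "good" || p.1 == "bad"))).map (·.1)
  let c := PySem.Dict.counter chunk_ratings
  let e := PySem.Dict.counter elem_ratings
  let cg := c.getD "good" 0
  let cb := c.getD "bad" 0
  let eg := e.getD "good" 0
  let eb := e.getD "bad" 0
  [("overall", [("good", cg + eg), ("bad", cb + eb), ("total", (cg + cb) + (eg + eb))]),
   ("chunks", [("good", cg), ("bad", cb), ("total", cg + cb)]),
   ("elements", [("good", eg), ("bad", eb), ("total", eg + eb)])]

-- ===== PRECONDITION & SPEC =====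
def Spec_summarize_reviews_py (items : List (List (String × Option String))) (out : List (String × List (String × Int))) : Prop := out = summarize_reviews_py_alt items
instance (items : List (List (String × Option String))) (out : List (String × List (String × Int))) : Decidable (Spec_summarize_reviews_py items out) := by unfold Spec_summarize_reviews_py; infer_instance

-- ===== CLAIM (what is proved, stated in full; the proofs are below) =====
def Claim_equal_summarize_reviews_py : Prop := ∀ (items : List (List (String × Option String))), Dom_summarize_reviews_py items → Spec_summarize_reviews_py items (summarize_reviews_py items)

-- ===== LEMMAS AND PROOFS =====

-- the loop body of port A, named for the proofs (definitionally the lambda in summarize_reviews_py)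
def pvStep (s : PySem.Dict String (PySem.Dict String Int)) (item : List (String × Option String)) : PySem.Dict String (PySem.Dict String Int) :=
  if item = [] then s
  else
    let rating := pvGetStr item "rating"
    let kind := pvGetStr item "kind"
    if ¬ (rating = "good" ∨ rating = "bad") then s
    else
      let s := s.modify "overall" PySem.Dict.empty
        (fun d => (d.modify rating 0 (· + 1)).modify "total" 0 (· + 1))
      s.modify (if kind = "chunk" then "chunks" else "elements") PySem.Dict.empty
        (fun d => (d.modify rating 0 (· + 1)).modify "total" 0 (· + 1))

-- the canonical shape of A's summary state
def pvS (og ob ot cg cb ct eg eb et : Int) : PySem.Dict String (PySem.Dict String Int) :=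
  PySem.Dict.mk [("overall", PySem.Dict.mk [("good", og), ("bad", ob), ("total", ot)]),
                 ("chunks",  PySem.Dict.mk [("good", cg), ("bad", cb), ("total", ct)]),
                 ("elements", PySem.Dict.mk [("good", eg), ("bad", eb), ("total", et)])]

def pGood (it : List (String × Option String)) : Bool := !(it = []) && (pvGetStr it "rating" == "good")
def pBad (it : List (String × Option String)) : Bool := !(it = []) && (pvGetStr it "rating" == "bad")
def pCG (it : List (String × Option String)) : Bool := pGood it && (pvGetStr it "kind" == "chunk")
def pCB (it : List (String × Option String)) : Bool := pBad it && (pvGetStr it "kind" == "chunk")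
def pEG (it : List (String × Option String)) : Bool := pGood it && !(pvGetStr it "kind" == "chunk")
def pEB (it : List (String × Option String)) : Bool := pBad it && !(pvGetStr it "kind" == "chunk")

lemma pv_countP_split {a : Type} (l : List a) (p q : a -> Bool) :
    l.countP p = l.countP (fun x => p x && q x) + l.countP (fun x => p x && !q x) := by
  induction l with
  | nil => simp
  | cons x l ih =>
    simp only [List.countP_cons, ih]
    cases hp : p x <;> cases hq : q x <;> simp [hp, hq] <;> omega

lemma pv_fold_eq (l : List (List (String × Option String))) :
    ∀ og ob ot cg cb ct eg eb et : Int,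
    l.foldl pvStep (pvS og ob ot cg cb ct eg eb et) =
      pvS (og + l.countP pGood) (ob + l.countP pBad) (ot + l.countP pGood + l.countP pBad)
          (cg + l.countP pCG) (cb + l.countP pCB) (ct + l.countP pCG + l.countP pCB)
          (eg + l.countP pEG) (eb + l.countP pEB) (et + l.countP pEG + l.countP pEB) := by
  induction l with
  | nil => intro og ob ot cg cb ct eg eb et; simp
  | cons it l ih =>
    intro og ob ot cg cb ct eg eb et
    rw [List.foldl_cons]
    by_cases he : it = []
    · have hstep : pvStep (pvS og ob ot cg cb ct eg eb et) it = pvS og ob ot cg cb ct eg eb et := by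
        simp [pvStep, he]
      rw [hstep, ih]
      simp [pvS, List.countP_cons, pGood, pBad, pCG, pCB, pEG, pEB, he]
    · by_cases hg : pvGetStr it "rating" = "good"
      · by_cases hk : pvGetStr it "kind" = "chunk"
        · have hstep : pvStep (pvS og ob ot cg cb ct eg eb et) it
              = pvS (og + 1) ob (ot + 1) (cg + 1) cb (ct + 1) eg eb et := by
            simp [pvStep, pvS, he, hg, hk, PySem.Dict.modify, PySem.Dict.insert,
                  PySem.Dict.getD, PySem.Dict.get?, PySem.Dict.contains]
          rw [hstep, ih]
          simp only [pvS, List.countP_cons, pGood, pBad, pCG, pCB, pEG, pEB, he, hg, hk,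
                     PySem.Dict.mk.injEq, List.cons.injEq, Prod.mk.injEq, and_true, true_and]
          simp [hk]
          omega
        · have hstep : pvStep (pvS og ob ot cg cb ct eg eb et) it
              = pvS (og + 1) ob (ot + 1) cg cb ct (eg + 1) eb (et + 1) := by
            simp [pvStep, pvS, he, hg, hk, PySem.Dict.modify, PySem.Dict.insert,
                  PySem.Dict.getD, PySem.Dict.get?, PySem.Dict.contains]
          rw [hstep, ih]
          simp only [pvS, List.countP_cons, pGood, pBad, pCG, pCB, pEG, pEB, he, hg, hk,
                     PySem.Dict.mk.injEq, List.cons.injEq, Prod.mk.injEq, and_true, true_and]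
          simp [hk]
          omega
      · by_cases hb : pvGetStr it "rating" = "bad"
        · by_cases hk : pvGetStr it "kind" = "chunk"
          · have hstep : pvStep (pvS og ob ot cg cb ct eg eb et) it
                = pvS og (ob + 1) (ot + 1) cg (cb + 1) (ct + 1) eg eb et := by
              simp [pvStep, pvS, he, hg, hb, hk, PySem.Dict.modify, PySem.Dict.insert,
                    PySem.Dict.getD, PySem.Dict.get?, PySem.Dict.contains]
            rw [hstep, ih]
            simp only [pvS, List.countP_cons, pGood, pBad, pCG, pCB, pEG, pEB, he, hg, hb, hk,
                       PySem.Dict.mk.injEq, List.cons.injEq, Prod.mk.injEq, and_true, true_and]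
            simp [hk]
            omega
          · have hstep : pvStep (pvS og ob ot cg cb ct eg eb et) it
                = pvS og (ob + 1) (ot + 1) cg cb ct eg (eb + 1) (et + 1) := by
              simp [pvStep, pvS, he, hg, hb, hk, PySem.Dict.modify, PySem.Dict.insert,
                    PySem.Dict.getD, PySem.Dict.get?, PySem.Dict.contains]
            rw [hstep, ih]
            simp only [pvS, List.countP_cons, pGood, pBad, pCG, pCB, pEG, pEB, he, hg, hb, hk,
                       PySem.Dict.mk.injEq, List.cons.injEq, Prod.mk.injEq, and_true, true_and]
            simp [hk]
            omega
        · have hstep : pvStep (pvS og ob ot cg cb ct eg eb et) it = pvS og ob ot cg cb ct eg eb et := by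
            simp [pvStep, he, hg, hb]
          rw [hstep, ih]
          simp [pvS, List.countP_cons, pGood, pBad, pCG, pCB, pEG, pEB, he, hg, hb]

lemma pvA_eq (items : List (List (String × Option String))) :
    summarize_reviews_py items =
      [("overall", [("good", ((items.countP pGood : Int))), ("bad", (items.countP pBad : Int)),
                    ("total", ((items.countP pGood : Int) + (items.countP pBad : Int)))]),
       ("chunks", [("good", (items.countP pCG : Int)), ("bad", (items.countP pCB : Int)),
                   ("total", ((items.countP pCG : Int) + (items.countP pCB : Int)))]),
       ("elements", [("good", (items.countP pEG : Int)), ("bad", (items.countP pEB : Int)),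
                     ("total", ((items.countP pEG : Int) + (items.countP pEB : Int)))])] := by
  have h0 : summarize_reviews_py items = (items.foldl pvStep (pvS 0 0 0 0 0 0 0 0 0)).items.map
      (fun p => (p.1, p.2.items)) := rfl
  rw [h0, pv_fold_eq]
  simp [pvS, PySem.Dict.items]

lemma pv_count_chunk (items : List (List (String × Option String))) (r : String) :
    ((((items.filter (fun item => !(item = []))).map
        (fun item => (pvGetStr item "rating", pvGetStr item "kind"))).filter
        (fun p => p.2 == "chunk" && (p.1 == "good" || p.1 == "bad"))).map (fun p => p.1)).count r
      = items.countP (fun it => !(it = []) && (pvGetStr it "rating" == r) && (pvGetStr it "kind" == "chunk")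
          && (r == "good" || r == "bad")) := by
  induction items with
  | nil => simp
  | cons it l ih =>
    by_cases he : it = [] <;>
      simp only [List.filter_cons, List.countP_cons, he, decide_true, decide_false, Bool.not_true,
        Bool.not_false, if_true, if_false, Bool.false_and, Bool.and_false, ite_true, ite_false,
        List.map_cons, ih] <;> try simp [ih]
    by_cases hk : pvGetStr it "kind" = "chunk" <;>
      by_cases hr : pvGetStr it "rating" = r <;>
      by_cases hg : pvGetStr it "rating" = "good" <;>
      by_cases hbd : pvGetStr it "rating" = "bad" <;>
      simp [List.filter_cons, List.count_cons, hk, hr, hg, hbd, ih] <;>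
      (try subst hr) <;> simp_all <;> omega

lemma pv_count_elem (items : List (List (String × Option String))) (r : String) :
    ((((items.filter (fun item => !(item = []))).map
        (fun item => (pvGetStr item "rating", pvGetStr item "kind"))).filter
        (fun p => p.2 != "chunk" && (p.1 == "good" || p.1 == "bad"))).map (fun p => p.1)).count r
      = items.countP (fun it => !(it = []) && (pvGetStr it "rating" == r) && !(pvGetStr it "kind" == "chunk")
          && (r == "good" || r == "bad")) := by
  induction items with
  | nil => simp
  | cons it l ih =>
    by_cases he : it = [] <;>
      simp only [List.filter_cons, List.countP_cons, he, decide_true, decide_false, Bool.not_true,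
        Bool.not_false, if_true, if_false, Bool.false_and, Bool.and_false, ite_true, ite_false,
        List.map_cons, ih] <;> try simp [ih]
    by_cases hk : pvGetStr it "kind" = "chunk" <;>
      by_cases hr : pvGetStr it "rating" = r <;>
      by_cases hg : pvGetStr it "rating" = "good" <;>
      by_cases hbd : pvGetStr it "rating" = "bad" <;>
      simp [List.filter_cons, List.count_cons, hk, hr, hg, hbd, ih] <;>
      (try subst hr) <;> simp_all <;> omega

lemma pvB_eq (items : List (List (String × Option String))) :
    summarize_reviews_py_alt items =
      [("overall", [("good", ((items.countP pCG : Int) + (items.countP pEG : Int))),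
                    ("bad", ((items.countP pCB : Int) + (items.countP pEB : Int))),
                    ("total", (((items.countP pCG : Int) + (items.countP pCB : Int))
                      + ((items.countP pEG : Int) + (items.countP pEB : Int))))]),
       ("chunks", [("good", (items.countP pCG : Int)), ("bad", (items.countP pCB : Int)),
                   ("total", ((items.countP pCG : Int) + (items.countP pCB : Int)))]),
       ("elements", [("good", (items.countP pEG : Int)), ("bad", (items.countP pEB : Int)),
                     ("total", ((items.countP pEG : Int) + (items.countP pEB : Int)))])] := by
  show [_, _, _] = _
  rw [PySem.Dict.getD_counter, PySem.Dict.getD_counter, PySem.Dict.getD_counter,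
      PySem.Dict.getD_counter, pv_count_chunk, pv_count_chunk, pv_count_elem, pv_count_elem]
  have h1 : (fun it => !(it = []) && (pvGetStr it "rating" == "good") && (pvGetStr it "kind" == "chunk")
          && (("good" : String) == "good" || ("good" : String) == "bad")) = pCG := by
    funext it; simp [pCG, pGood, Bool.and_assoc]
  have h2 : (fun it => !(it = []) && (pvGetStr it "rating" == "bad") && (pvGetStr it "kind" == "chunk")
          && (("bad" : String) == "good" || ("bad" : String) == "bad")) = pCB := by
    funext it; simp [pCB, pBad, Bool.and_assoc]
  have h3 : (fun it => !(it = []) && (pvGetStr it "rating" == "good") && !(pvGetStr it "kind" == "chunk")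
          && (("good" : String) == "good" || ("good" : String) == "bad")) = pEG := by
    funext it; simp [pEG, pGood, Bool.and_assoc]
  have h4 : (fun it => !(it = []) && (pvGetStr it "rating" == "bad") && !(pvGetStr it "kind" == "chunk")
          && (("bad" : String) == "good" || ("bad" : String) == "bad")) = pEB := by
    funext it; simp [pEB, pBad, Bool.and_assoc]
  rw [h1, h2, h3, h4]

-- ===== VERDICT (by name: the statement is the Claim_ definition above) =====
theorem summarize_reviews_py_spec : Claim_equal_summarize_reviews_py := by
  intro items _
  show summarize_reviews_py items = summarize_reviews_py_alt items
  have hg : items.countP pGood = items.countP pCG + items.countP pEG := by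
    have h := pv_countP_split items pGood (fun it => pvGetStr it "kind" == "chunk")
    unfold pCG pEG
    exact h
  have hb : items.countP pBad = items.countP pCB + items.countP pEB := by
    have h := pv_countP_split items pBad (fun it => pvGetStr it "kind" == "chunk")
    unfold pCB pEB
    exact h
  rw [pvA_eq, pvB_eq, hg, hb]
  simp only [List.cons.injEq, Prod.mk.injEq, and_true, true_and]
  push_cast
  omega
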